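-- pv_equiv track=rewrite | github.com/gabrielezi/Kodavimo-teorija | veiksmai.py | skaidytiBinary
-- ===== SOURCE A (Python) =====
-- def skaidytiBinary(text):
--         binary_values = text.split()
--         skaidList = []
--         addedZeros = []
--         for binary_value in binary_values:
--             integer = binary_value
--             for _ in range(12-len(binary_value)):
--                 integer = integer + "0"
--             addedZeros.append(12-len(binary_value))
--             skaidList.append(int(integer))
--         return skaidList, addedZeros
-- ===== SOURCE B (Python) =====
-- def skaidytiBinary(text):
--     tokens = text.split()
--     skaidList = [int(t + "0" * (12 - len(t))) for t in tokens]
--     addedZeros = [12 - len(t) for t in tokens]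
--     return skaidList, addedZeros
-- ===== Notes on version B (the rewrite author's own statement) =====
-- stated objective: simpler
-- what changed: Replaced A's single loop with two list accumulators and its inner character-appending padding loop by two list comprehensions that pad each token with closed-form string repetition of the zero character.
import Mathlib
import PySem

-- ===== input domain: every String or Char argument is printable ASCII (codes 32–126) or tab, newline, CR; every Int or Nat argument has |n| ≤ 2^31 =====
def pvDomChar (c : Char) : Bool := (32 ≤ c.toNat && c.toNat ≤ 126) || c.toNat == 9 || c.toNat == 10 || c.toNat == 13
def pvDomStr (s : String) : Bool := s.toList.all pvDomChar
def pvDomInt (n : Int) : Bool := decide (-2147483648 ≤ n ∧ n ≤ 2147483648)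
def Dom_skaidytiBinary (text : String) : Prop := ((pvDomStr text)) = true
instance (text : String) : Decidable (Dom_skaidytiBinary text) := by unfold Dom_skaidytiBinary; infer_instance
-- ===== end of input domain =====

-- B replaces A's single loop with two accumulators and its inner char-appending loop by two
-- comprehensions that pad via closed-form repetition of the zero character: simpler, same behaviour.

-- ===== PORT A =====
def skaidytiBinary (text : String) : List Int × List Int :=
  let binary_values := PySem.Str.split₀ text
  binary_values.foldl
    (fun (acc : List Int × List Int) binary_value =>
      let integer := (PySem.List.pyRange 0 (12 - PySem.Str.len binary_value) 1).foldl
        (fun s _ => s ++ ['0']) binary_value.toList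
      (acc.1 ++ [(PySem.Int.ofChars? integer).getD 0],
       acc.2 ++ [12 - PySem.Str.len binary_value]))
    ([], [])

-- ===== PORT B =====
def skaidytiBinary_alt (text : String) : List Int × List Int :=
  let tokens := PySem.Str.split₀ text
  (tokens.map (fun t =>
      (PySem.Int.ofChars? (t.toList ++ PySem.List.pyRepeat ['0'] (12 - PySem.Str.len t))).getD 0),
   tokens.map (fun t => 12 - PySem.Str.len t))

-- ===== PRECONDITION & SPEC =====
-- Pre_ excludes exactly the inputs on which Python A raises ValueError: a token that, after the
-- zero padding, is still not a valid int literal.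
def Pre_skaidytiBinary (text : String) : Prop :=
  ∀ t ∈ PySem.Str.split₀ text,
    (PySem.Int.ofChars? (t.toList ++ List.replicate (12 - PySem.Str.len t).toNat '0')).isSome = true
instance (text : String) : Decidable (Pre_skaidytiBinary text) := by
  unfold Pre_skaidytiBinary; infer_instance

def pvWitness_skaidytiBinary : String := "101 1100110011001 0"

def Spec_skaidytiBinary (text : String) (out : List Int × List Int) : Prop := out = skaidytiBinary_alt text
instance (text : String) (out : List Int × List Int) : Decidable (Spec_skaidytiBinary text out) := by unfold Spec_skaidytiBinary; infer_instance

-- ===== CLAIM (what is proved, stated in full; the proofs are below) =====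
def Claim_equal_skaidytiBinary : Prop := ∀ (text : String), Dom_skaidytiBinary text → Pre_skaidytiBinary text → Spec_skaidytiBinary text (skaidytiBinary text)

-- ===== LEMMAS AND PROOFS =====

-- A's inner loop appends one '0' per iteration: it produces the closed-form padding.
theorem pad_range (m : Nat) (s : List Char) :
    (List.range m).foldl (fun s (_ : Nat) => s ++ ['0']) s = s ++ List.replicate m '0' := by
  induction m generalizing s with
  | zero => simp
  | succ m ih =>
      rw [List.range_succ, List.foldl_append]
      simp [ih, List.replicate_succ']

theorem pad_loop (n : Int) (s : List Char) :
    (PySem.List.pyRange 0 n 1).foldl (fun s (_ : Int) => s ++ ['0']) s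
      = s ++ List.replicate n.toNat '0' := by
  rw [PySem.List.pyRange_one, List.foldl_map]
  simp [pad_range]

-- A's loop over the tokens with a pair accumulator is the pair of maps.
theorem foldl_pair_map (toks : List String) (f g : String → Int) (a b : List Int) :
    toks.foldl (fun (acc : List Int × List Int) t => (acc.1 ++ [f t], acc.2 ++ [g t])) (a, b)
      = (a ++ toks.map f, b ++ toks.map g) := by
  induction toks generalizing a b with
  | nil => simp
  | cons t ts ih => simp [List.foldl_cons, ih]

-- ===== VERDICT (by name: the statement is the Claim_ definition above) =====
theorem skaidytiBinary_spec : Claim_equal_skaidytiBinary := by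
  intro text _ _
  show skaidytiBinary text = skaidytiBinary_alt text
  unfold skaidytiBinary skaidytiBinary_alt
  simp only [pad_loop, PySem.List.pyRepeat_singleton, foldl_pair_map, List.nil_append]
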